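-- pv_equiv track=rewrite | github.com/coolguy157/Latin-Research | deltaVerification.py | search_transversal_with_fixed
-- ===== SOURCE A (Python) =====
-- def delta(x, y, z, n):
--     diff = z-x-y
--     return (diff) % n if diff > 0 else diff % -n
--
-- def search_transversal_with_fixed(n, latin_square, fixed, row_list, col_avail, current, current_delta, target_delta):
--     """
--     Searches for a transversal that includes the fixed element.
--
--     Parameters:
--       n           - size of the Latin square
--       latin_square- the n x n Latin square (list of lists)
--       fixed       - tuple (fx, fy, fz) representing the fixed element (already in the transversal)
--       row_list    - list of remaining row indices to process (fixed row is removed)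
--       col_avail   - set of columns still available (fixed column removed)
--       current     - list of selected cells so far, each as (row, col, symbol)
--       current_delta - current sum of delta values modulo n for the chosen cells
--       target_delta- value that current_delta must equal at the end (should be -delta(fixed) mod n)
--     """
--     if not row_list:
--         # Base case: all rows processed.
--         # Check if the delta condition holds.
--         if current_delta % n == target_delta % n:
--             return [current.copy()]
--         else:
--             return []
--
--     # Choose next row to assign a cell
--     solutions = []
--     row = row_list[0]
--     # Try every available column in this row.
--     for col in list(col_avail):
--         symbol = latin_square[row][col]
--         # For a proper transversal, you also need to check that the symbol hasn't been used.
--         # Here we assume current already uses distinct symbols (you can manage that similarly).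
--         # For simplicity, we omit the symbol-check in this sketch.
--
--         d = delta(row, col, symbol, n)
--         # Choose this cell
--         current.append((row, col, symbol))
--         col_avail.remove(col)
--         # Recursively process the remaining rows.
--         sols = search_transversal_with_fixed(n, latin_square,
--                                              fixed, row_list[1:], col_avail,
--                                              current, (current_delta + d) % n, target_delta)
--         solutions.extend(sols)
--         # Backtrack
--         current.pop()
--         col_avail.add(col)
--     return solutions
-- ===== SOURCE B (Python) =====
-- def delta(x, y, z, n):
--     diff = z-x-y
--     return (diff) % n if diff > 0 else diff % -n
--
-- def search_transversal_with_fixed(n, latin_square, fixed, row_list, col_avail, current, current_delta, target_delta):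
--     # Flat generate-and-filter: enumerate the k-permutations of the available
--     # columns (in itertools.permutations position order), score each whole
--     # assignment at once, and keep the ones meeting the delta target.
--     def kperms(pool, k):
--         if k == 0:
--             return [[]]
--         return [[pool[i]] + rest
--                 for i in range(len(pool))
--                 for rest in kperms(pool[:i] + pool[i + 1:], k - 1)]
--
--     cols = list(col_avail)
--     result = []
--     for perm in kperms(cols, len(row_list)):
--         cells = [(r, c, latin_square[r][c]) for r, c in zip(row_list, perm)]
--         total = (current_delta + sum(delta(r, c, s, n) for r, c, s in cells)) % n
--         if total == target_delta % n:
--             result.append(list(current) + cells)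
--     return result
-- ===== Notes on version B (the rewrite author's own statement) =====
-- stated objective: simpler
-- what changed: Replaces the mutating recursive backtracking (append/remove, recurse, pop/add, running delta re-modded at every level) with a flat generate-and-filter: enumerate the k-permutations of the available columns once, score each complete assignment with a single sum and one final mod, and keep the ones hitting the target.
import Mathlib
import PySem

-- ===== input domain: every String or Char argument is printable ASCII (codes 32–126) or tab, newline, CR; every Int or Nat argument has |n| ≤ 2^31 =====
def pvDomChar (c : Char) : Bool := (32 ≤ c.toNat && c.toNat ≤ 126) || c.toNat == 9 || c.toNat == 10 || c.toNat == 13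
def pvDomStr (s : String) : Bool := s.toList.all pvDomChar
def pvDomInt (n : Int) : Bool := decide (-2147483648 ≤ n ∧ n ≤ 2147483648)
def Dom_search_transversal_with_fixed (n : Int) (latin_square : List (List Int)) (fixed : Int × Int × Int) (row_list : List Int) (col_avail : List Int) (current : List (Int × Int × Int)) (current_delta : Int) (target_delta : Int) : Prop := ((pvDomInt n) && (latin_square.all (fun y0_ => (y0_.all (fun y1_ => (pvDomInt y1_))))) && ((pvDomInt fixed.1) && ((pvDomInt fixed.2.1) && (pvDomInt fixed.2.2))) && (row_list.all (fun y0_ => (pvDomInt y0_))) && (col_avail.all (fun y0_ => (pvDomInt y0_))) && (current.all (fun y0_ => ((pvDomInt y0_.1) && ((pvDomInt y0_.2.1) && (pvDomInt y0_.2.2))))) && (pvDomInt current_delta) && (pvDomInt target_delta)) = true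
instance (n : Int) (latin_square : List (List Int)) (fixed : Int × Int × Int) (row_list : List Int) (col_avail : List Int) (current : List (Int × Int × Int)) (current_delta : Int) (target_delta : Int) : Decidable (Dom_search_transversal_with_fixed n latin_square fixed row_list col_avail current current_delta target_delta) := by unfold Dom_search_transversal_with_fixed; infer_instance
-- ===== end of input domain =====

-- B replaces A's mutating backtracking with a flat generate-and-filter over column
-- k-permutations (objective: simpler decomposition, same cost). A mutates col_avail /
-- current and restores them before returning; the equivalence is about the return value,
-- with the Python set col_avail modelled as its list of distinct elements in order
-- (CPython's hash iteration order is not modelled).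

-- ===== PORT A =====
-- helper delta(x, y, z, n) of the module
def pvDelta (x y z n : Int) : Int :=
  let diff := z - x - y
  if diff > 0 then PySem.Int.mod diff n else PySem.Int.mod diff (-n)

-- latin_square[row][col]; exact under Pre_ (both indices in range, so the defaults are unused)
def pvSym (latin_square : List (List Int)) (row col : Int) : Int :=
  PySem.List.pyGetD (PySem.List.pyGetD latin_square row []) col 0

def search_transversal_with_fixed (n : Int) (latin_square : List (List Int)) (fixed : Int × Int × Int) (row_list : List Int) (col_avail : List Int) (current : List (Int × Int × Int)) (current_delta : Int) (target_delta : Int) : List (List (Int × Int × Int)) :=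
  match row_list with
  | [] =>
      if PySem.Int.mod current_delta n = PySem.Int.mod target_delta n then [current] else []
  | row :: rest =>
      -- 'for col in list(col_avail)': remove col for the recursive call, re-add on backtrack
      col_avail.foldl (fun solutions col =>
        let symbol := pvSym latin_square row col
        let d := pvDelta row col symbol n
        solutions ++ search_transversal_with_fixed n latin_square fixed rest
          (col_avail.erase col) (current ++ [(row, col, symbol)])
          (PySem.Int.mod (current_delta + d) n) target_delta) []

-- ===== PORT B =====
-- Source B's kperms(pool, k): pool[:i] = take i, pool[i+1:] = drop (i+1) (0 ≤ i, PySem slice lemmas)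
def pvKperms (pool : List Int) (k : Nat) : List (List Int) :=
  match k with
  | 0 => [[]]
  | k' + 1 =>
      (List.range pool.length).flatMap (fun i =>
        match pool[i]? with
        | some x => (pvKperms (pool.take i ++ pool.drop (i + 1)) k').map (fun rest => x :: rest)
        | none => [])

-- cells = [(r, c, latin_square[r][c]) for r, c in zip(row_list, perm)]
def pvCells (latin_square : List (List Int)) (rows perm : List Int) : List (Int × Int × Int) :=
  (rows.zip perm).map (fun rc => (rc.1, rc.2, pvSym latin_square rc.1 rc.2))

def search_transversal_with_fixed_alt (n : Int) (latin_square : List (List Int)) (fixed : Int × Int × Int) (row_list : List Int) (col_avail : List Int) (current : List (Int × Int × Int)) (current_delta : Int) (target_delta : Int) : List (List (Int × Int × Int)) :=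
  (pvKperms col_avail row_list.length).foldl (fun result perm =>
    let cells := pvCells latin_square row_list perm
    if PySem.Int.mod (current_delta + (cells.map (fun c => pvDelta c.1 c.2.1 c.2.2 n)).sum) n
         = PySem.Int.mod target_delta n
    then result ++ [current ++ cells] else result) []

-- ===== PRECONDITION & SPEC =====
-- Pre_ excludes exactly the inputs where the Python A raises: col_avail with duplicates is
-- not a Python set (A takes a set); n = 0 raises ZeroDivisionError unless no '%' is ever
-- evaluated (nonempty row_list with no column available); and every cell A actually reads
-- (rows at the first min(len(row_list), len(col_avail)) levels, any available column) must
-- be in range, else IndexError.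
def Pre_search_transversal_with_fixed (n : Int) (latin_square : List (List Int)) (fixed : Int × Int × Int) (row_list : List Int) (col_avail : List Int) (current : List (Int × Int × Int)) (current_delta : Int) (target_delta : Int) : Prop :=
  col_avail.Nodup ∧
  (n ≠ 0 ∨ (row_list ≠ [] ∧ col_avail = [])) ∧
  ((row_list.take col_avail.length).all (fun row =>
      match PySem.List.pyGet? latin_square row with
      | some r => col_avail.all (fun col => (PySem.List.pyGet? r col).isSome)
      | none => false) = true)
instance (n : Int) (latin_square : List (List Int)) (fixed : Int × Int × Int) (row_list : List Int) (col_avail : List Int) (current : List (Int × Int × Int)) (current_delta : Int) (target_delta : Int) : Decidable (Pre_search_transversal_with_fixed n latin_square fixed row_list col_avail current current_delta target_delta) := by unfold Pre_search_transversal_with_fixed; infer_instance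

def pvWitness_search_transversal_with_fixed : Int × List (List Int) × (Int × Int × Int) × List Int × List Int × (List (Int × Int × Int)) × Int × Int :=
  (3, [[0, 1, 2], [1, 2, 0], [2, 0, 1]], (0, 0, 0), [1, 2], [1, 2], [], 0, 0)

def Spec_search_transversal_with_fixed (n : Int) (latin_square : List (List Int)) (fixed : Int × Int × Int) (row_list : List Int) (col_avail : List Int) (current : List (Int × Int × Int)) (current_delta : Int) (target_delta : Int) (out : List (List (Int × Int × Int))) : Prop := out = search_transversal_with_fixed_alt n latin_square fixed row_list col_avail current current_delta target_delta
instance (n : Int) (latin_square : List (List Int)) (fixed : Int × Int × Int) (row_list : List Int) (col_avail : List Int) (current : List (Int × Int × Int)) (current_delta : Int) (target_delta : Int) (out : List (List (Int × Int × Int))) : Decidable (Spec_search_transversal_with_fixed n latin_square fixed row_list col_avail current current_delta target_delta out) := by unfold Spec_search_transversal_with_fixed; infer_instance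

-- ===== CLAIM (what is proved, stated in full; the proofs are below) =====
def Claim_equal_search_transversal_with_fixed : Prop := ∀ (n : Int) (latin_square : List (List Int)) (fixed : Int × Int × Int) (row_list : List Int) (col_avail : List Int) (current : List (Int × Int × Int)) (current_delta : Int) (target_delta : Int), Dom_search_transversal_with_fixed n latin_square fixed row_list col_avail current current_delta target_delta → Pre_search_transversal_with_fixed n latin_square fixed row_list col_avail current current_delta target_delta → Spec_search_transversal_with_fixed n latin_square fixed row_list col_avail current current_delta target_delta (search_transversal_with_fixed n latin_square fixed row_list col_avail current current_delta target_delta)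

-- ===== LEMMAS AND PROOFS =====

-- folding Python's '%' through a running sum (floor mod; holds for every n, Int.fmod laws)
theorem pv_mod_add_mod (a b n : Int) :
    PySem.Int.mod (PySem.Int.mod a n + b) n = PySem.Int.mod (a + b) n := by
  simp [PySem.Int.mod]

theorem pv_flatMap_congr {α β : Type} (l : List α) (f g : α → List β)
    (h : ∀ x ∈ l, f x = g x) : l.flatMap f = l.flatMap g := by
  induction l with
  | nil => rfl
  | cons x xs ih =>
      simp only [List.flatMap_cons]
      rw [h x (by simp), ih (fun y hy => h y (by simp [hy]))]

theorem pv_flatMap_ite {α β : Type} (l : List α) (p : α → Prop) [DecidablePred p] (f : α → β) :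
    l.flatMap (fun x => if p x then [f x] else []) =
    (l.filter (fun x => decide (p x))).map f := by
  induction l with
  | nil => rfl
  | cons x xs ih =>
      by_cases hx : p x <;> simp [hx, ih]

-- index-based position removal over a Nodup list is element removal
theorem pv_flatIdx {β : Type} (G : Int → List Int → List β) :
    ∀ (l : List Int), l.Nodup →
      (List.range l.length).flatMap (fun i =>
        match l[i]? with
        | some c => G c (l.take i ++ l.drop (i + 1))
        | none => []) =
      l.flatMap (fun c => G c (l.erase c)) := by
  intro l
  induction l generalizing G with
  | nil => intro _; rfl
  | cons x xs ih =>
      intro hnd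
      have hx : x ∉ xs := (List.nodup_cons.mp hnd).1
      have hxs : xs.Nodup := (List.nodup_cons.mp hnd).2
      rw [List.length_cons, List.range_succ_eq_map, List.flatMap_cons, List.flatMap_map]
      simp only [List.getElem?_cons_succ, List.getElem?_cons_zero, List.take_succ_cons,
        List.drop_succ_cons, List.take_zero, List.drop_zero, List.nil_append, List.cons_append]
      rw [ih (fun c pool => G c (x :: pool)) hxs]
      rw [List.flatMap_cons, List.erase_cons_head]
      congr 1
      apply pv_flatMap_congr
      intro c hc
      have : c ≠ x := fun h => hx (h ▸ hc)
      rw [List.erase_cons_tail (by simpa using this.symm)]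

-- A's backtracking equals the flat enumeration over pvKperms
theorem pv_main (n : Int) (ls : List (List Int)) (fx : Int × Int × Int) (td : Int) :
    ∀ (rows cols : List Int) (cur : List (Int × Int × Int)) (cd : Int), cols.Nodup →
      search_transversal_with_fixed n ls fx rows cols cur cd td =
      (pvKperms cols rows.length).flatMap (fun perm =>
        if PySem.Int.mod (cd + ((pvCells ls rows perm).map (fun c => pvDelta c.1 c.2.1 c.2.2 n)).sum) n
             = PySem.Int.mod td n
        then [cur ++ pvCells ls rows perm] else []) := by
  intro rows
  induction rows with
  | nil =>
      intro cols cur cd _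
      simp [search_transversal_with_fixed, pvKperms, pvCells]
  | cons row rest ih =>
      intro cols cur cd hnd
      rw [show search_transversal_with_fixed n ls fx (row :: rest) cols cur cd td =
            cols.foldl (fun solutions col =>
              solutions ++ search_transversal_with_fixed n ls fx rest
                (cols.erase col) (cur ++ [(row, col, pvSym ls row col)])
                (PySem.Int.mod (cd + pvDelta row col (pvSym ls row col) n) n) td) [] from rfl]
      rw [PySem.List.foldl_append_eq_flatMap, List.nil_append]
      have hstep : ∀ col ∈ cols,
          search_transversal_with_fixed n ls fx rest (cols.erase col)
            (cur ++ [(row, col, pvSym ls row col)])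
            (PySem.Int.mod (cd + pvDelta row col (pvSym ls row col) n) n) td =
          (pvKperms (cols.erase col) rest.length).flatMap (fun p =>
            if PySem.Int.mod ((cd + pvDelta row col (pvSym ls row col) n) +
                  ((pvCells ls rest p).map (fun c => pvDelta c.1 c.2.1 c.2.2 n)).sum) n
                 = PySem.Int.mod td n
            then [(cur ++ [(row, col, pvSym ls row col)]) ++ pvCells ls rest p] else []) := by
        intro col _
        rw [ih _ _ _ (hnd.erase col)]
        simp only [pv_mod_add_mod]
      rw [pv_flatMap_congr _ _ _ hstep]
      rw [show (row :: rest).length = rest.length + 1 from rfl]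
      rw [show pvKperms cols (rest.length + 1) =
            (List.range cols.length).flatMap (fun i =>
              match cols[i]? with
              | some x => (pvKperms (cols.take i ++ cols.drop (i + 1)) rest.length).map (fun r => x :: r)
              | none => []) from rfl]
      rw [pv_flatIdx (fun c pool => (pvKperms pool rest.length).map (fun r => c :: r)) cols hnd]
      rw [List.flatMap_assoc]
      apply pv_flatMap_congr
      intro col _
      rw [List.flatMap_map]
      apply pv_flatMap_congr
      intro p _
      simp only [pvCells, List.zip_cons_cons, List.map_cons, List.sum_cons, List.cons_append,
        List.append_assoc, List.nil_append, add_assoc]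

-- B's fold equals the same flat enumeration
theorem pv_alt_eq (n : Int) (ls : List (List Int)) (fx : Int × Int × Int)
    (rows cols : List Int) (cur : List (Int × Int × Int)) (cd td : Int) :
    search_transversal_with_fixed_alt n ls fx rows cols cur cd td =
    (pvKperms cols rows.length).flatMap (fun perm =>
      if PySem.Int.mod (cd + ((pvCells ls rows perm).map (fun c => pvDelta c.1 c.2.1 c.2.2 n)).sum) n
           = PySem.Int.mod td n
      then [cur ++ pvCells ls rows perm] else []) := by
  rw [search_transversal_with_fixed_alt]
  rw [PySem.List.foldl_append_ite
        (p := fun perm => PySem.Int.mod (cd + ((pvCells ls rows perm).map (fun c => pvDelta c.1 c.2.1 c.2.2 n)).sum) n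
             = PySem.Int.mod td n)
        (f := fun perm => cur ++ pvCells ls rows perm)]
  rw [pv_flatMap_ite, List.nil_append]

-- ===== VERDICT (by name: the statement is the Claim_ definition above) =====
theorem search_transversal_with_fixed_spec : Claim_equal_search_transversal_with_fixed := by
  intro n ls fx rows cols cur cd td _ hpre
  unfold Spec_search_transversal_with_fixed
  rw [pv_main n ls fx td rows cols cur cd hpre.1, pv_alt_eq]
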